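-- pv_equiv track=rewrite | github.com/harpreet-2146/fakeye | backend/app/retriever/improved_stance.py | normalize_text_for_matching
-- ===== SOURCE A (Python) =====
-- def normalize_text_for_matching(text: str) -> str:
--     """
--     Normalize text by replacing common synonyms and aliases
--     """
--     text_lower = text.lower()
--
--     # Country/location synonyms
--     replacements = {
--         'united states': 'usa',
--         'united kingdom': 'uk',
--         'great britain': 'uk',
--         'britain': 'uk',
--         'people\'s republic of china': 'china',
--         'russian federation': 'russia',
--     }
--
--     for original, replacement in replacements.items():
--         text_lower = text_lower.replace(original, replacement)
--
--     return text_lower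
-- ===== SOURCE B (Python) =====
-- import re
--
-- _MAPPING = {
--     'united states': 'usa',
--     'united kingdom': 'uk',
--     'great britain': 'uk',
--     'britain': 'uk',
--     'people\'s republic of china': 'china',
--     'russian federation': 'russia',
-- }
--
-- # Alternation in dict order: leftmost scan, first-matching alternative wins,
-- # which reproduces the sequential-replace outcome (no replacement output
-- # re-triggers another pattern here).
-- _PATTERN = re.compile('|'.join(re.escape(k) for k in _MAPPING))
--
--
-- def normalize_text_for_matching(text: str) -> str:
--     return _PATTERN.sub(lambda m: _MAPPING[m.group(0)], text.lower())
-- ===== Notes on version B (the rewrite author's own statement) =====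
-- stated objective: idiomatic
-- what changed: Replaces the six sequential full-string .replace passes with one compiled regex alternation applied in a single left-to-right scan of the lowered text (keys in dict order so 'great britain' precedes 'britain'), mapping each match through the dict.
import Mathlib
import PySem

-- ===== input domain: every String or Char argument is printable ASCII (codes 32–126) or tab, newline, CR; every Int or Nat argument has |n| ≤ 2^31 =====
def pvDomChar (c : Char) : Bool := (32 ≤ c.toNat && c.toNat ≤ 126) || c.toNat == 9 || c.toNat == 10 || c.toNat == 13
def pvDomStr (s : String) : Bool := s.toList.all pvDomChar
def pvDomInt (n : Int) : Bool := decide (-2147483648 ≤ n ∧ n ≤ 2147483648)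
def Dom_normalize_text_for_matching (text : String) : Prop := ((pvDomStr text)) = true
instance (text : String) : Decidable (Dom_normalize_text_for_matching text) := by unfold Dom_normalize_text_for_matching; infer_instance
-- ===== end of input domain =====

-- B replaces A's six sequential full-string replace passes by a single left-to-right
-- scan (a compiled regex alternation in dict order); same return value, proved equal.

-- ===== PORT A =====
-- the replacements dict, in insertion order
def pvReplacements : List (String × String) :=
  [("united states", "usa"),
   ("united kingdom", "uk"),
   ("great britain", "uk"),
   ("britain", "uk"),
   ("people's republic of china", "china"),
   ("russian federation", "russia")]

def normalize_text_for_matching (text : String) : String :=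
  -- text_lower = text.lower(); for original, replacement in replacements.items(): text_lower = text_lower.replace(original, replacement)
  pvReplacements.foldl (fun tl pr => PySem.Str.replace tl pr.1 pr.2) (PySem.Str.lower text)

-- ===== PORT B =====
-- the six alternatives of the compiled alternation, in dict order, as char lists
def pUS : List Char := ['u','n','i','t','e','d',' ','s','t','a','t','e','s']
def pUKD : List Char := ['u','n','i','t','e','d',' ','k','i','n','g','d','o','m']
def pGB : List Char := ['g','r','e','a','t',' ','b','r','i','t','a','i','n']
def pBR : List Char := ['b','r','i','t','a','i','n']
def pPRC : List Char := ['p','e','o','p','l','e','\'','s',' ','r','e','p','u','b','l','i','c',' ','o','f',' ','c','h','i','n','a']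
def pRF : List Char := ['r','u','s','s','i','a','n',' ','f','e','d','e','r','a','t','i','o','n']
def rUSA : List Char := ['u','s','a']
def rUK : List Char := ['u','k']
def rCH : List Char := ['c','h','i','n','a']
def rRU : List Char := ['r','u','s','s','i','a']

-- _PATTERN.sub(lambda m: _MAPPING[m.group(0)], ·): one left-to-right scan; at each
-- position the first alternative (in dict order) that matches is replaced, otherwise
-- the character is copied.  Exact for this alternation of literal alternatives.
-- fuel = number of characters left, decreases by ≥ 1 each step.
def scanFuel : Nat → List Char → List Char
  | 0, l => l
  | _+1, [] => []
  | fuel+1, c :: t =>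
    if pUS.isPrefixOf (c :: t) then rUSA ++ scanFuel fuel (List.drop 13 (c :: t))
    else if pUKD.isPrefixOf (c :: t) then rUK ++ scanFuel fuel (List.drop 14 (c :: t))
    else if pGB.isPrefixOf (c :: t) then rUK ++ scanFuel fuel (List.drop 13 (c :: t))
    else if pBR.isPrefixOf (c :: t) then rUK ++ scanFuel fuel (List.drop 7 (c :: t))
    else if pPRC.isPrefixOf (c :: t) then rCH ++ scanFuel fuel (List.drop 26 (c :: t))
    else if pRF.isPrefixOf (c :: t) then rRU ++ scanFuel fuel (List.drop 18 (c :: t))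
    else c :: scanFuel fuel t

def pyScan (l : List Char) : List Char := scanFuel l.length l

def normalize_text_for_matching_alt (text : String) : String :=
  String.ofList (pyScan (PySem.Str.lower text).toList)

-- ===== PRECONDITION & SPEC =====
def Spec_normalize_text_for_matching (text : String) (out : String) : Prop := out = normalize_text_for_matching_alt text
instance (text : String) (out : String) : Decidable (Spec_normalize_text_for_matching text out) := by unfold Spec_normalize_text_for_matching; infer_instance

-- ===== CLAIM (what is proved, stated in full; the proofs are below) =====
def Claim_equal_normalize_text_for_matching : Prop := ∀ (text : String), Dom_normalize_text_for_matching text → Spec_normalize_text_for_matching text (normalize_text_for_matching text)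

-- ===== LEMMAS AND PROOFS =====

-- a fuelled transcription of `str.replace`'s scan (PySem.Chars.replace.go without the accumulator)
def repFuel (p r : List Char) : Nat → List Char → List Char
  | 0, l => l
  | _+1, [] => []
  | fuel+1, c :: t =>
    if p.isPrefixOf (c :: t) then r ++ repFuel p r fuel (List.drop p.length (c :: t))
    else c :: repFuel p r fuel t

def pyReplace (s p r : List Char) : List Char := repFuel p r s.length s

lemma go_eq (p r : List Char) : ∀ (fuel : Nat) (l acc : List Char),
    PySem.Chars.replace.go p r fuel l acc = acc.reverse ++ repFuel p r fuel l := by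
  intro fuel
  induction fuel with
  | zero =>
    intro l acc
    rw [PySem.Chars.replace.go.eq_def]
    simp [repFuel]
  | succ n ih =>
    intro l acc
    cases l with
    | nil =>
      rw [PySem.Chars.replace.go.eq_def]
      simp [repFuel]
    | cons c t =>
      rw [PySem.Chars.replace.go.eq_def]
      simp only [repFuel]
      by_cases hpre : p.isPrefixOf (c :: t)
      · simp [hpre, ih]
      · simp [hpre, ih]

lemma chars_replace_eq (s p r : List Char) (hp : p ≠ []) :
    PySem.Chars.replace s p r = pyReplace s p r := by
  unfold PySem.Chars.replace
  rw [if_neg (by simp [hp]), go_eq]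
  simp [pyReplace]

lemma repFuel_mono (p r : List Char) (hp : p ≠ []) :
    ∀ (f₁ : Nat) (l : List Char) (f₂ : Nat), l.length ≤ f₁ → l.length ≤ f₂ →
      repFuel p r f₁ l = repFuel p r f₂ l := by
  intro f₁
  induction f₁ with
  | zero =>
    intro l f₂ h1 _
    have : l = [] := List.eq_nil_of_length_eq_zero (Nat.le_zero.mp h1)
    subst this
    cases f₂ <;> simp [repFuel]
  | succ n ih =>
    intro l f₂ h1 h2
    cases l with
    | nil => cases f₂ <;> simp [repFuel]
    | cons c t =>
      cases f₂ with
      | zero => simp at h2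
      | succ m =>
        simp only [repFuel]
        by_cases hpre : p.isPrefixOf (c :: t)
        · have hplen : 1 ≤ p.length := by
            cases p with
            | nil => exact absurd rfl hp
            | cons a b => simp
          have hd : (List.drop p.length (c :: t)).length ≤ n := by
            simp only [List.length_drop, List.length_cons]
            simp only [List.length_cons] at h1
            omega
          have hd2 : (List.drop p.length (c :: t)).length ≤ m := by
            simp only [List.length_drop, List.length_cons]
            simp only [List.length_cons] at h2
            omega
          simp [hpre, ih _ _ hd hd2]
        · have ht : t.length ≤ n := by simp only [List.length_cons] at h1; omega
          have ht2 : t.length ≤ m := by simp only [List.length_cons] at h2; omega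
          simp [hpre, ih _ _ ht ht2]

lemma pyReplace_cons (p r : List Char) (hp : p ≠ []) (c : Char) (t : List Char) :
    pyReplace (c :: t) p r =
      if p.isPrefixOf (c :: t) then r ++ pyReplace (List.drop p.length (c :: t)) p r
      else c :: pyReplace t p r := by
  unfold pyReplace
  simp only [List.length_cons, repFuel]
  by_cases hpre : p.isPrefixOf (c :: t)
  · have hplen : 1 ≤ p.length := by
      cases p with
      | nil => exact absurd rfl hp
      | cons a b => simp
    have hd : (List.drop p.length (c :: t)).length ≤ t.length := by
      simp only [List.length_drop, List.length_cons]; omega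
    simp [hpre, repFuel_mono p r hp t.length _ _ hd (le_refl _)]
  · simp [hpre]

lemma prefix_or {w l₁ l₂ : List Char} (h : w <+: l₁ ++ l₂) : w <+: l₁ ∨ l₁ <+: w := by
  rcases Nat.le_total w.length l₁.length with hle | hle
  · exact Or.inl (List.prefix_of_prefix_length_le h (List.prefix_append l₁ l₂) hle)
  · exact Or.inr (List.prefix_of_prefix_length_le (List.prefix_append l₁ l₂) h hle)

-- no occurrence of p can start inside w (even spanning past it): replace walks through w
lemma pyReplace_pass (p r : List Char) (hp : p ≠ []) (w : List Char)
    (H : ∀ j, j < w.length → ¬ p <+: w.drop j ∧ ¬ w.drop j <+: p) :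
    ∀ x, pyReplace (w ++ x) p r = w ++ pyReplace x p r := by
  induction w with
  | nil => intro x; simp
  | cons c w' ih =>
    intro x
    have hcond : ¬ p.isPrefixOf (c :: (w' ++ x)) = true := by
      intro hpre
      have h0 := H 0 (by simp)
      simp only [List.drop_zero] at h0
      have hpre' : p <+: (c :: w') ++ x := by
        simpa using List.isPrefixOf_iff_prefix.mp hpre
      rcases prefix_or hpre' with h | h
      · exact h0.1 h
      · exact h0.2 h
    have H' : ∀ j, j < w'.length → ¬ p <+: w'.drop j ∧ ¬ w'.drop j <+: p := by
      intro j hj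
      have := H (j + 1) (by simp only [List.length_cons]; omega)
      simpa using this
    rw [List.cons_append, pyReplace_cons p r hp, if_neg hcond, ih H' x]
    simp

lemma pyReplace_match (p r : List Char) (hp : p ≠ []) (x : List Char) :
    pyReplace (p ++ x) p r = r ++ pyReplace x p r := by
  cases p with
  | nil => exact absurd rfl hp
  | cons a p' =>
    rw [List.cons_append, pyReplace_cons _ _ hp, if_pos, ← List.cons_append,
        List.drop_left]
    exact List.isPrefixOf_iff_prefix.mpr (List.prefix_append _ _)

-- a string w that cannot overlap the replacement r is a prefix of the output only
-- if it already was a prefix of the input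
lemma pyReplace_back (p r : List Char) (hp : p ≠ []) :
    ∀ (t w : List Char),
      (∀ j, j < w.length → ¬ w.drop j <+: r ∧ ¬ r <+: w.drop j) →
      w <+: pyReplace t p r → w <+: t := by
  intro t
  induction t with
  | nil =>
    intro w _ hw
    have hw' : w = [] := by simpa [pyReplace, repFuel] using hw
    simp [hw']
  | cons c t' ih =>
    intro w H hw
    rw [pyReplace_cons p r hp] at hw
    by_cases hpre : p.isPrefixOf (c :: t')
    · rw [if_pos hpre] at hw
      cases w with
      | nil => exact List.nil_prefix
      | cons d w' =>
        have h0 := H 0 (by simp)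
        rcases prefix_or hw with h | h
        · exact absurd (by simpa using h) h0.1
        · exact absurd (by simpa using h) h0.2
    · rw [if_neg hpre] at hw
      cases w with
      | nil => exact List.nil_prefix
      | cons d w' =>
        rw [List.cons_prefix_cons] at hw
        obtain ⟨hd, hw'⟩ := hw
        have : w' <+: t' := ih w' (fun j hj => H (j + 1) (by simpa using Nat.succ_lt_succ hj)) hw'
        rw [hd, List.cons_prefix_cons]
        exact ⟨rfl, this⟩

-- the six replaces of A, innermost first
def chainAll (l : List Char) : List Char :=
  pyReplace (pyReplace (pyReplace (pyReplace (pyReplace (pyReplace l pUS rUSA)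
    pUKD rUK) pGB rUK) pBR rUK) pPRC rCH) pRF rRU

lemma chain_p1 (x : List Char) : chainAll (pUS ++ x) = rUSA ++ chainAll x := by
  unfold chainAll
  rw [pyReplace_match pUS rUSA (by decide),
      pyReplace_pass pUKD rUK (by decide) rUSA (by decide),
      pyReplace_pass pGB rUK (by decide) rUSA (by decide),
      pyReplace_pass pBR rUK (by decide) rUSA (by decide),
      pyReplace_pass pPRC rCH (by decide) rUSA (by decide),
      pyReplace_pass pRF rRU (by decide) rUSA (by decide)]

lemma chain_p2 (x : List Char) : chainAll (pUKD ++ x) = rUK ++ chainAll x := by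
  unfold chainAll
  rw [pyReplace_pass pUS rUSA (by decide) pUKD (by decide),
      pyReplace_match pUKD rUK (by decide),
      pyReplace_pass pGB rUK (by decide) rUK (by decide),
      pyReplace_pass pBR rUK (by decide) rUK (by decide),
      pyReplace_pass pPRC rCH (by decide) rUK (by decide),
      pyReplace_pass pRF rRU (by decide) rUK (by decide)]

lemma chain_p3 (x : List Char) : chainAll (pGB ++ x) = rUK ++ chainAll x := by
  unfold chainAll
  rw [pyReplace_pass pUS rUSA (by decide) pGB (by decide),
      pyReplace_pass pUKD rUK (by decide) pGB (by decide),
      pyReplace_match pGB rUK (by decide),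
      pyReplace_pass pBR rUK (by decide) rUK (by decide),
      pyReplace_pass pPRC rCH (by decide) rUK (by decide),
      pyReplace_pass pRF rRU (by decide) rUK (by decide)]

lemma chain_p4 (x : List Char) : chainAll (pBR ++ x) = rUK ++ chainAll x := by
  unfold chainAll
  rw [pyReplace_pass pUS rUSA (by decide) pBR (by decide),
      pyReplace_pass pUKD rUK (by decide) pBR (by decide),
      pyReplace_pass pGB rUK (by decide) pBR (by decide),
      pyReplace_match pBR rUK (by decide),
      pyReplace_pass pPRC rCH (by decide) rUK (by decide),
      pyReplace_pass pRF rRU (by decide) rUK (by decide)]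

lemma chain_p5 (x : List Char) : chainAll (pPRC ++ x) = rCH ++ chainAll x := by
  unfold chainAll
  rw [pyReplace_pass pUS rUSA (by decide) pPRC (by decide),
      pyReplace_pass pUKD rUK (by decide) pPRC (by decide),
      pyReplace_pass pGB rUK (by decide) pPRC (by decide),
      pyReplace_pass pBR rUK (by decide) pPRC (by decide),
      pyReplace_match pPRC rCH (by decide),
      pyReplace_pass pRF rRU (by decide) rCH (by decide)]

lemma chain_p6 (x : List Char) : chainAll (pRF ++ x) = rRU ++ chainAll x := by
  unfold chainAll
  rw [pyReplace_pass pUS rUSA (by decide) pRF (by decide),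
      pyReplace_pass pUKD rUK (by decide) pRF (by decide),
      pyReplace_pass pGB rUK (by decide) pRF (by decide),
      pyReplace_pass pBR rUK (by decide) pRF (by decide),
      pyReplace_pass pPRC rCH (by decide) pRF (by decide),
      pyReplace_match pRF rRU (by decide)]

lemma chain_default (c : Char) (t : List Char)
    (h1 : ¬ pUS <+: c :: t) (h2 : ¬ pUKD <+: c :: t) (h3 : ¬ pGB <+: c :: t)
    (h4 : ¬ pBR <+: c :: t) (h5 : ¬ pPRC <+: c :: t) (h6 : ¬ pRF <+: c :: t) :
    chainAll (c :: t) = c :: chainAll t := by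
  have n2 : ¬ pUKD <+: c :: pyReplace t pUS rUSA := by
    intro hpre
    rw [show pUKD = 'u' :: pUKD.tail from rfl, List.cons_prefix_cons] at hpre
    have hb := pyReplace_back pUS rUSA (by decide) t _ (by decide) hpre.2
    exact h2 (by rw [show pUKD = 'u' :: pUKD.tail from rfl, List.cons_prefix_cons]
                 exact ⟨hpre.1, hb⟩)
  have n3 : ¬ pGB <+: c :: pyReplace (pyReplace t pUS rUSA) pUKD rUK := by
    intro hpre
    rw [show pGB = 'g' :: pGB.tail from rfl, List.cons_prefix_cons] at hpre
    have hb := pyReplace_back pUKD rUK (by decide) _ _ (by decide) hpre.2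
    have hb := pyReplace_back pUS rUSA (by decide) t _ (by decide) hb
    exact h3 (by rw [show pGB = 'g' :: pGB.tail from rfl, List.cons_prefix_cons]
                 exact ⟨hpre.1, hb⟩)
  have n4 : ¬ pBR <+: c :: pyReplace (pyReplace (pyReplace t pUS rUSA) pUKD rUK) pGB rUK := by
    intro hpre
    rw [show pBR = 'b' :: pBR.tail from rfl, List.cons_prefix_cons] at hpre
    have hb := pyReplace_back pGB rUK (by decide) _ _ (by decide) hpre.2
    have hb := pyReplace_back pUKD rUK (by decide) _ _ (by decide) hb
    have hb := pyReplace_back pUS rUSA (by decide) t _ (by decide) hb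
    exact h4 (by rw [show pBR = 'b' :: pBR.tail from rfl, List.cons_prefix_cons]
                 exact ⟨hpre.1, hb⟩)
  have n5 : ¬ pPRC <+: c :: pyReplace (pyReplace (pyReplace (pyReplace t pUS rUSA) pUKD rUK) pGB rUK) pBR rUK := by
    intro hpre
    rw [show pPRC = 'p' :: pPRC.tail from rfl, List.cons_prefix_cons] at hpre
    have hb := pyReplace_back pBR rUK (by decide) _ _ (by decide) hpre.2
    have hb := pyReplace_back pGB rUK (by decide) _ _ (by decide) hb
    have hb := pyReplace_back pUKD rUK (by decide) _ _ (by decide) hb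
    have hb := pyReplace_back pUS rUSA (by decide) t _ (by decide) hb
    exact h5 (by rw [show pPRC = 'p' :: pPRC.tail from rfl, List.cons_prefix_cons]
                 exact ⟨hpre.1, hb⟩)
  have n6 : ¬ pRF <+: c :: pyReplace (pyReplace (pyReplace (pyReplace (pyReplace t pUS rUSA) pUKD rUK) pGB rUK) pBR rUK) pPRC rCH := by
    intro hpre
    rw [show pRF = 'r' :: pRF.tail from rfl, List.cons_prefix_cons] at hpre
    have hb := pyReplace_back pPRC rCH (by decide) _ _ (by decide) hpre.2
    have hb := pyReplace_back pBR rUK (by decide) _ _ (by decide) hb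
    have hb := pyReplace_back pGB rUK (by decide) _ _ (by decide) hb
    have hb := pyReplace_back pUKD rUK (by decide) _ _ (by decide) hb
    have hb := pyReplace_back pUS rUSA (by decide) t _ (by decide) hb
    exact h6 (by rw [show pRF = 'r' :: pRF.tail from rfl, List.cons_prefix_cons]
                 exact ⟨hpre.1, hb⟩)
  unfold chainAll
  rw [pyReplace_cons pUS rUSA (by decide),
      if_neg (by simpa [List.isPrefixOf_iff_prefix] using h1),
      pyReplace_cons pUKD rUK (by decide),
      if_neg (by simpa [List.isPrefixOf_iff_prefix] using n2),
      pyReplace_cons pGB rUK (by decide),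
      if_neg (by simpa [List.isPrefixOf_iff_prefix] using n3),
      pyReplace_cons pBR rUK (by decide),
      if_neg (by simpa [List.isPrefixOf_iff_prefix] using n4),
      pyReplace_cons pPRC rCH (by decide),
      if_neg (by simpa [List.isPrefixOf_iff_prefix] using n5),
      pyReplace_cons pRF rRU (by decide),
      if_neg (by simpa [List.isPrefixOf_iff_prefix] using n6)]

lemma scanFuel_mono :
    ∀ (f₁ : Nat) (l : List Char) (f₂ : Nat), l.length ≤ f₁ → l.length ≤ f₂ →
      scanFuel f₁ l = scanFuel f₂ l := by
  intro f₁
  induction f₁ with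
  | zero =>
    intro l f₂ h1 _
    have : l = [] := List.eq_nil_of_length_eq_zero (Nat.le_zero.mp h1)
    subst this
    cases f₂ <;> simp [scanFuel]
  | succ n ih =>
    intro l f₂ h1 h2
    cases l with
    | nil => cases f₂ <;> simp [scanFuel]
    | cons c t =>
      cases f₂ with
      | zero => simp at h2
      | succ m =>
        have hn : ∀ k : Nat, 1 ≤ k → (List.drop k (c :: t)).length ≤ n := by
          intro k hk
          simp only [List.length_drop, List.length_cons]
          simp only [List.length_cons] at h1
          omega
        have hm : ∀ k : Nat, 1 ≤ k → (List.drop k (c :: t)).length ≤ m := by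
          intro k hk
          simp only [List.length_drop, List.length_cons]
          simp only [List.length_cons] at h2
          omega
        have htn : t.length ≤ n := by simp only [List.length_cons] at h1; omega
        have htm : t.length ≤ m := by simp only [List.length_cons] at h2; omega
        simp only [scanFuel]
        split_ifs
        · exact congrArg (rUSA ++ ·) (ih _ _ (hn 13 (by norm_num)) (hm 13 (by norm_num)))
        · exact congrArg (rUK ++ ·) (ih _ _ (hn 14 (by norm_num)) (hm 14 (by norm_num)))
        · exact congrArg (rUK ++ ·) (ih _ _ (hn 13 (by norm_num)) (hm 13 (by norm_num)))
        · exact congrArg (rUK ++ ·) (ih _ _ (hn 7 (by norm_num)) (hm 7 (by norm_num)))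
        · exact congrArg (rCH ++ ·) (ih _ _ (hn 26 (by norm_num)) (hm 26 (by norm_num)))
        · exact congrArg (rRU ++ ·) (ih _ _ (hn 18 (by norm_num)) (hm 18 (by norm_num)))
        · exact congrArg (c :: ·) (ih _ _ htn htm)

lemma pyScan_cons (c : Char) (t : List Char) :
    pyScan (c :: t) =
      if pUS.isPrefixOf (c :: t) then rUSA ++ pyScan (List.drop 13 (c :: t))
      else if pUKD.isPrefixOf (c :: t) then rUK ++ pyScan (List.drop 14 (c :: t))
      else if pGB.isPrefixOf (c :: t) then rUK ++ pyScan (List.drop 13 (c :: t))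
      else if pBR.isPrefixOf (c :: t) then rUK ++ pyScan (List.drop 7 (c :: t))
      else if pPRC.isPrefixOf (c :: t) then rCH ++ pyScan (List.drop 26 (c :: t))
      else if pRF.isPrefixOf (c :: t) then rRU ++ pyScan (List.drop 18 (c :: t))
      else c :: pyScan t := by
  unfold pyScan
  simp only [List.length_cons, scanFuel]
  have hb : ∀ k : Nat, 1 ≤ k → (List.drop k (c :: t)).length ≤ t.length := by
    intro k hk
    simp only [List.length_drop, List.length_cons]
    omega
  split_ifs
  · exact congrArg (rUSA ++ ·) (scanFuel_mono t.length _ _ (hb 13 (by norm_num)) (le_refl _))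
  · exact congrArg (rUK ++ ·) (scanFuel_mono t.length _ _ (hb 14 (by norm_num)) (le_refl _))
  · exact congrArg (rUK ++ ·) (scanFuel_mono t.length _ _ (hb 13 (by norm_num)) (le_refl _))
  · exact congrArg (rUK ++ ·) (scanFuel_mono t.length _ _ (hb 7 (by norm_num)) (le_refl _))
  · exact congrArg (rCH ++ ·) (scanFuel_mono t.length _ _ (hb 26 (by norm_num)) (le_refl _))
  · exact congrArg (rRU ++ ·) (scanFuel_mono t.length _ _ (hb 18 (by norm_num)) (le_refl _))
  · rfl


lemma scan_p1 (x : List Char) : pyScan (pUS ++ x) = rUSA ++ pyScan x := by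
  rw [show pUS ++ x = 'u'::'n'::'i'::'t'::'e'::'d'::' '::'s'::'t'::'a'::'t'::'e'::'s'::x from rfl, pyScan_cons]
  simp [pUS, List.isPrefixOf]

lemma scan_p2 (x : List Char) : pyScan (pUKD ++ x) = rUK ++ pyScan x := by
  rw [show pUKD ++ x = 'u'::'n'::'i'::'t'::'e'::'d'::' '::'k'::'i'::'n'::'g'::'d'::'o'::'m'::x from rfl, pyScan_cons]
  simp [pUS, pUKD, List.isPrefixOf]

lemma scan_p3 (x : List Char) : pyScan (pGB ++ x) = rUK ++ pyScan x := by
  rw [show pGB ++ x = 'g'::'r'::'e'::'a'::'t'::' '::'b'::'r'::'i'::'t'::'a'::'i'::'n'::x from rfl, pyScan_cons]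
  simp [pUS, pUKD, pGB, List.isPrefixOf]

lemma scan_p4 (x : List Char) : pyScan (pBR ++ x) = rUK ++ pyScan x := by
  rw [show pBR ++ x = 'b'::'r'::'i'::'t'::'a'::'i'::'n'::x from rfl, pyScan_cons]
  simp [pUS, pUKD, pGB, pBR, List.isPrefixOf]

lemma scan_p5 (x : List Char) : pyScan (pPRC ++ x) = rCH ++ pyScan x := by
  rw [show pPRC ++ x = 'p'::'e'::'o'::'p'::'l'::'e'::'\''::'s'::' '::'r'::'e'::'p'::'u'::'b'::'l'::'i'::'c'::' '::'o'::'f'::' '::'c'::'h'::'i'::'n'::'a'::x from rfl, pyScan_cons]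
  simp [pUS, pUKD, pGB, pBR, pPRC, List.isPrefixOf]

lemma scan_p6 (x : List Char) : pyScan (pRF ++ x) = rRU ++ pyScan x := by
  rw [show pRF ++ x = 'r'::'u'::'s'::'s'::'i'::'a'::'n'::' '::'f'::'e'::'d'::'e'::'r'::'a'::'t'::'i'::'o'::'n'::x from rfl, pyScan_cons]
  simp [pUS, pUKD, pGB, pBR, pPRC, pRF, List.isPrefixOf]

lemma chain_eq_scan : ∀ (n : Nat) (l : List Char), l.length ≤ n → chainAll l = pyScan l := by
  intro n
  induction n with
  | zero =>
    intro l h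
    have : l = [] := List.eq_nil_of_length_eq_zero (Nat.le_zero.mp h)
    subst this
    rfl
  | succ n ih =>
    intro l hl
    cases l with
    | nil => rfl
    | cons c t =>
      simp only [List.length_cons] at hl
      by_cases g1 : pUS <+: c :: t
      · obtain ⟨x, hx⟩ := g1
        rw [← hx, chain_p1, scan_p1]
        exact congrArg (rUSA ++ ·) (ih x (by have := congrArg List.length hx; simp [pUS] at this; omega))
      by_cases g2 : pUKD <+: c :: t
      · obtain ⟨x, hx⟩ := g2
        rw [← hx, chain_p2, scan_p2]
        exact congrArg (rUK ++ ·) (ih x (by have := congrArg List.length hx; simp [pUKD] at this; omega))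
      by_cases g3 : pGB <+: c :: t
      · obtain ⟨x, hx⟩ := g3
        rw [← hx, chain_p3, scan_p3]
        exact congrArg (rUK ++ ·) (ih x (by have := congrArg List.length hx; simp [pGB] at this; omega))
      by_cases g4 : pBR <+: c :: t
      · obtain ⟨x, hx⟩ := g4
        rw [← hx, chain_p4, scan_p4]
        exact congrArg (rUK ++ ·) (ih x (by have := congrArg List.length hx; simp [pBR] at this; omega))
      by_cases g5 : pPRC <+: c :: t
      · obtain ⟨x, hx⟩ := g5
        rw [← hx, chain_p5, scan_p5]
        exact congrArg (rCH ++ ·) (ih x (by have := congrArg List.length hx; simp [pPRC] at this; omega))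
      by_cases g6 : pRF <+: c :: t
      · obtain ⟨x, hx⟩ := g6
        rw [← hx, chain_p6, scan_p6]
        exact congrArg (rRU ++ ·) (ih x (by have := congrArg List.length hx; simp [pRF] at this; omega))
      rw [chain_default c t g1 g2 g3 g4 g5 g6, pyScan_cons,
          if_neg (by simpa [List.isPrefixOf_iff_prefix] using g1),
          if_neg (by simpa [List.isPrefixOf_iff_prefix] using g2),
          if_neg (by simpa [List.isPrefixOf_iff_prefix] using g3),
          if_neg (by simpa [List.isPrefixOf_iff_prefix] using g4),
          if_neg (by simpa [List.isPrefixOf_iff_prefix] using g5),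
          if_neg (by simpa [List.isPrefixOf_iff_prefix] using g6)]
      exact congrArg (c :: ·) (ih t (by omega))

-- ===== VERDICT (by name: the statement is the Claim_ definition above) =====
theorem normalize_text_for_matching_spec : Claim_equal_normalize_text_for_matching := by
  unfold Claim_equal_normalize_text_for_matching
  intro text _
  unfold Spec_normalize_text_for_matching normalize_text_for_matching normalize_text_for_matching_alt
  simp only [pvReplacements, List.foldl]
  have hlist :
      (PySem.Str.replace (PySem.Str.replace (PySem.Str.replace (PySem.Str.replace
        (PySem.Str.replace (PySem.Str.replace (PySem.Str.lower text)
          "united states" "usa") "united kingdom" "uk") "great britain" "uk")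
          "britain" "uk") "people's republic of china" "china")
          "russian federation" "russia").toList
        = pyScan (PySem.Str.lower text).toList := by
    simp only [PySem.Str.toList_replace]
    rw [chars_replace_eq _ _ _ (by decide), chars_replace_eq _ _ _ (by decide),
        chars_replace_eq _ _ _ (by decide), chars_replace_eq _ _ _ (by decide),
        chars_replace_eq _ _ _ (by decide), chars_replace_eq _ _ _ (by decide)]
    have hc : ∀ l : List Char, chainAll l = pyScan l :=
      fun l => chain_eq_scan l.length l (le_refl _)
    have := hc (PySem.Str.lower text).toList
    unfold chainAll at this
    rw [show "united states".toList = pUS from rfl, show "usa".toList = rUSA from rfl,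
        show "united kingdom".toList = pUKD from rfl, show "uk".toList = rUK from rfl,
        show "great britain".toList = pGB from rfl,
        show "britain".toList = pBR from rfl,
        show "people's republic of china".toList = pPRC from rfl,
        show "china".toList = rCH from rfl,
        show "russian federation".toList = pRF from rfl,
        show "russia".toList = rRU from rfl]
    exact this
  calc _ = String.ofList (_root_.PySem.Str.replace (PySem.Str.replace (PySem.Str.replace (PySem.Str.replace
        (PySem.Str.replace (PySem.Str.replace (PySem.Str.lower text)
          "united states" "usa") "united kingdom" "uk") "great britain" "uk")
          "britain" "uk") "people's republic of china" "china")
          "russian federation" "russia").toList := String.ofList_toList.symm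
    _ = _ := congrArg String.ofList hlist
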